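-- pv_equiv track=rewrite | github.com/Tovar188/Proyectos | main.py | automata_a_expresion_regular
-- ===== SOURCE A (Python) =====
-- def automata_a_expresion_regular(cadena):
--     # Definir el autómata finito
--     automata = {f'q{i}': {cadena[i]: f'q{i+1}'} for i in range(len(cadena)-1)}
--     automata[f'q{len(cadena)-1}'] = {cadena[-1]: ''}
--
--     # Estado inicial y estado final
--     estado_inicial = 'q0'
--     estado_final = f'q{len(cadena)-1}'
--
--     # Obtener la secuencia de transiciones
--     transiciones = []
--     estado_actual = estado_inicial
--     for simbolo in cadena:
--         estado_siguiente = automata[estado_actual][simbolo]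
--         transiciones.append(f"{estado_actual} -> {estado_siguiente} ({simbolo})")
--         estado_actual = estado_siguiente
--
--     # Crear la expresión regular
--     expresion_regular = ''.join(transiciones)
--
--     return expresion_regular, automata
-- ===== SOURCE B (Python) =====
-- def automata_a_expresion_regular(cadena):
--     n = len(cadena)
--     automata = {}
--     transiciones = []
--     for i in range(n - 1):
--         automata[f'q{i}'] = {cadena[i]: f'q{i+1}'}
--         transiciones.append(f'q{i} -> q{i+1} ({cadena[i]})')
--     automata[f'q{n-1}'] = {cadena[-1]: ''}
--     transiciones.append(f'q{n-1} ->  ({cadena[-1]})')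
--     return ''.join(transiciones), automata
-- ===== Notes on version B (the rewrite author's own statement) =====
-- stated objective: simpler
-- what changed: B builds the automaton and the transition strings in one loop directly from the indices, dropping A's second pass that re-derives each transition by two dict lookups per symbol.
import Mathlib
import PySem

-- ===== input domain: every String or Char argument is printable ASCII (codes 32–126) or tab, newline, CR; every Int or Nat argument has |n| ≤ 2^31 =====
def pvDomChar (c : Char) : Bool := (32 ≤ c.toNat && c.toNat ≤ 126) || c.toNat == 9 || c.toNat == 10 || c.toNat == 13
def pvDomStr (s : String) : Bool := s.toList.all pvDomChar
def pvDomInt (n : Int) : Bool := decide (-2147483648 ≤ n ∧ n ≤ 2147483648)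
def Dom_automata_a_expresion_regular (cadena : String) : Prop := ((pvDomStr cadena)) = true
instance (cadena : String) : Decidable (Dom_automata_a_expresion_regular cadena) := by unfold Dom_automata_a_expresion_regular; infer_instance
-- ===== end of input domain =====

-- B merges A's two passes into one index loop that emits each transition string directly,
-- instead of re-deriving every transition by two dict lookups per symbol (objective: simpler).

-- ===== PORT A =====
-- A-side helper: A's first two statements (the dict comprehension over range(len(cadena)-1)
-- followed by the assignment automata[f'q{len(cadena)-1}'] = {cadena[-1]: ''}), transliterated.
def pvDictA (cadena : String) : PySem.Dict String (PySem.Dict String String) :=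
  let cs := cadena.toList
  ((PySem.List.pyRange 0 (PySem.Str.len cadena - 1) 1).foldl
    (fun d i =>
      d.insert ("q" ++ PySem.Int.toStr i)
        (PySem.Dict.empty.insert (String.ofList [PySem.List.pyGetD cs i ' '])
          ("q" ++ PySem.Int.toStr (i + 1))))
    PySem.Dict.empty).insert ("q" ++ PySem.Int.toStr (PySem.Str.len cadena - 1))
    (PySem.Dict.empty.insert (String.ofList [PySem.List.pyGetD cs (-1) ' ']) "")

-- Port of A: build the dict, then a second pass over the symbols walking the dict
-- (estado_actual carried as state, two lookups per symbol); the missing-key default ""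
-- of getD is never taken under Pre_ (nonempty input).
def automata_a_expresion_regular (cadena : String) : String × (List (String × List (String × String))) :=
  let automata := pvDictA cadena
  let cs := cadena.toList
  let r := cs.foldl
    (fun (st : List String × String) simbolo =>
      let estado_siguiente := (automata.getD st.2 PySem.Dict.empty).getD (String.ofList [simbolo]) ""
      (st.1 ++ [st.2 ++ " -> " ++ estado_siguiente ++ " (" ++ String.ofList [simbolo] ++ ")"],
       estado_siguiente))
    ([], "q0")
  (PySem.Str.join "" r.1, automata.items.map (fun p => (p.1, p.2.items)))

-- ===== PORT B =====
-- Port of B (Source B): ONE loop over i in range(n-1) builds the dict entry and appends the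
-- transition string directly; the last state/transition handled after the loop.
def automata_a_expresion_regular_alt (cadena : String) : String × (List (String × List (String × String))) :=
  let cs := cadena.toList
  let n := PySem.Str.len cadena
  let r := (PySem.List.pyRange 0 (n - 1) 1).foldl
    (fun (st : PySem.Dict String (PySem.Dict String String) × List String) i =>
      (st.1.insert ("q" ++ PySem.Int.toStr i)
          (PySem.Dict.empty.insert (String.ofList [PySem.List.pyGetD cs i ' '])
            ("q" ++ PySem.Int.toStr (i + 1))),
       st.2 ++ ["q" ++ PySem.Int.toStr i ++ " -> q" ++ PySem.Int.toStr (i + 1) ++ " (" ++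
         String.ofList [PySem.List.pyGetD cs i ' '] ++ ")"]))
    (PySem.Dict.empty, [])
  let automata := r.1.insert ("q" ++ PySem.Int.toStr (n - 1))
    (PySem.Dict.empty.insert (String.ofList [PySem.List.pyGetD cs (-1) ' ']) "")
  let transiciones := r.2 ++ ["q" ++ PySem.Int.toStr (n - 1) ++ " ->  (" ++
    String.ofList [PySem.List.pyGetD cs (-1) ' '] ++ ")"]
  (PySem.Str.join "" transiciones, automata.items.map (fun p => (p.1, p.2.items)))

-- ===== PRECONDITION & SPEC =====
-- Pre_ excludes only the empty string, on which A raises IndexError at cadena[-1].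
def Pre_automata_a_expresion_regular (cadena : String) : Prop := cadena ≠ ""
instance (cadena : String) : Decidable (Pre_automata_a_expresion_regular cadena) := by
  unfold Pre_automata_a_expresion_regular; infer_instance
def pvWitness_automata_a_expresion_regular : String := "ab"

def Spec_automata_a_expresion_regular (cadena : String) (out : String × (List (String × List (String × String)))) : Prop := out = automata_a_expresion_regular_alt cadena
instance (cadena : String) (out : String × (List (String × List (String × String)))) : Decidable (Spec_automata_a_expresion_regular cadena out) := by unfold Spec_automata_a_expresion_regular; infer_instance

-- ===== CLAIM (what is proved, stated in full; the proofs are below) =====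
def Claim_equal_automata_a_expresion_regular : Prop := ∀ (cadena : String), Dom_automata_a_expresion_regular cadena → Pre_automata_a_expresion_regular cadena → Spec_automata_a_expresion_regular cadena (automata_a_expresion_regular cadena)

-- ===== LEMMAS AND PROOFS =====

-- proof-side abbreviations for the strings/dicts the two programs build
def pvKey (i : Nat) : String := "q" ++ PySem.Int.toStr (i : Int)
def pvSym (cs : List Char) (i : Nat) : String := String.ofList [cs.getD i ' ']
def pvNext (m i : Nat) : String := if i = m then "" else pvKey (i + 1)
def pvInner (cs : List Char) (m i : Nat) : PySem.Dict String String :=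
  PySem.Dict.empty.insert (pvSym cs i) (pvNext m i)
def pvTr (cs : List Char) (m i : Nat) : String :=
  pvKey i ++ " -> " ++ pvNext m i ++ " (" ++ pvSym cs i ++ ")"

-- decimal representation of a Nat, and injectivity of Nat.toDigits 10 via it
def pvRep10 (k : Nat) : List Char :=
  if k < 10 then [Nat.digitChar k] else pvRep10 (k / 10) ++ [Nat.digitChar (k % 10)]
decreasing_by exact Nat.div_lt_self (by omega) (by omega)

lemma pvRep10_ne_nil (k : Nat) : pvRep10 k ≠ [] := by
  rw [pvRep10]; split <;> simp

lemma pvToDigitsCore_eq : ∀ (fuel k : Nat) (ds : List Char), k < fuel →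
    Nat.toDigitsCore 10 fuel k ds = pvRep10 k ++ ds := by
  intro fuel
  induction fuel with
  | zero => intro k ds h; omega
  | succ fuel ih =>
    intro k ds _
    simp only [Nat.toDigitsCore]
    by_cases h0 : k / 10 = 0
    · rw [if_pos h0, pvRep10, if_pos (by omega), Nat.mod_eq_of_lt (by omega)]
      rfl
    · rw [if_neg h0, ih (k / 10) _ (by omega)]
      conv_rhs => rw [pvRep10]
      rw [if_neg (show ¬ k < 10 by omega)]
      simp

lemma pvDigitChar_inj : ∀ a < 10, ∀ b < 10, Nat.digitChar a = Nat.digitChar b → a = b := by decide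

lemma pvRep10_inj : ∀ a b : Nat, pvRep10 a = pvRep10 b → a = b := by
  intro a
  induction a using Nat.strong_induction_on with
  | _ a ih =>
    intro b h
    have ea : pvRep10 a
        = if a < 10 then [Nat.digitChar a] else pvRep10 (a / 10) ++ [Nat.digitChar (a % 10)] := by
      rw [pvRep10]
    have eb : pvRep10 b
        = if b < 10 then [Nat.digitChar b] else pvRep10 (b / 10) ++ [Nat.digitChar (b % 10)] := by
      rw [pvRep10]
    rcases Nat.lt_or_ge a 10 with ha | ha <;> rcases Nat.lt_or_ge b 10 with hb | hb
    · rw [ea, eb, if_pos ha, if_pos hb] at h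
      simp only [List.cons.injEq, and_true] at h
      exact pvDigitChar_inj a ha b hb h
    · rw [ea, eb, if_pos ha, if_neg (by omega)] at h
      have hl := congrArg List.length h
      rw [List.length_append, List.length_singleton, List.length_singleton] at hl
      have h0 : (pvRep10 (b / 10)).length = 0 := by omega
      exact absurd (List.length_eq_zero_iff.mp h0) (pvRep10_ne_nil _)
    · rw [ea, eb, if_neg (by omega), if_pos hb] at h
      have hl := congrArg List.length h
      rw [List.length_append, List.length_singleton, List.length_singleton] at hl
      have h0 : (pvRep10 (a / 10)).length = 0 := by omega
      exact absurd (List.length_eq_zero_iff.mp h0) (pvRep10_ne_nil _)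
    · rw [ea, eb, if_neg (by omega), if_neg (by omega)] at h
      obtain ⟨h1, h2⟩ := List.append_inj' h (by simp)
      have hd : a / 10 = b / 10 := ih (a / 10) (Nat.div_lt_self (by omega) (by omega)) _ h1
      simp only [List.cons.injEq, and_true] at h2
      have hm : a % 10 = b % 10 :=
        pvDigitChar_inj _ (Nat.mod_lt _ (by omega)) _ (Nat.mod_lt _ (by omega)) h2
      omega

lemma pvToDigits10_inj (a b : Nat) (h : Nat.toDigits 10 a = Nat.toDigits 10 b) : a = b := by
  unfold Nat.toDigits at h
  rw [pvToDigitsCore_eq _ _ _ (by omega), pvToDigitsCore_eq _ _ _ (by omega)] at h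
  simp at h
  exact pvRep10_inj a b h

lemma pvKey_inj : Function.Injective pvKey := by
  intro a b h
  rw [← String.toList_inj] at h
  simp only [pvKey, String.toList_append, PySem.Int.toList_toStr, PySem.Int.toChars] at h
  rw [if_neg (by omega), if_neg (by omega)] at h
  simp only [Int.toNat_natCast] at h
  exact pvToDigits10_inj a b (List.append_cancel_left h)

lemma pvKey_def (i : Nat) : "q" ++ PySem.Int.toStr (i : Int) = pvKey i := rfl

lemma pv_ne_nil {cs : List Char} {m : Nat} (h : cs.length = m + 1) : cs ≠ [] := by
  intro e; rw [e] at h; simp at h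

lemma pv_getD_elem {cs : List Char} {j : Nat} (hj : j < cs.length) : cs.getD j ' ' = cs[j] := by
  simp only [List.getD]
  rw [List.getElem?_eq_getElem hj]
  rfl

lemma pv_getLast_eq (cadena : String) (m : Nat) (h : cadena.toList.length = m + 1)
    (hne : cadena.toList ≠ []) :
    cadena.toList.getLast hne = cadena.toList.getD m ' ' := by
  rw [List.getLast_eq_getElem, pv_getD_elem (show m < cadena.toList.length by omega)]
  congr 1
  omega

lemma pv_sym_last (cadena : String) (m : Nat) (h : cadena.toList.length = m + 1)
    (hne : cadena.toList ≠ []) :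
    String.ofList [PySem.List.pyGetD cadena.toList (-1) ' '] = pvSym cadena.toList m := by
  rw [PySem.List.pyGetD_neg_one _ _ hne, pv_getLast_eq cadena m h hne]
  rfl

lemma pv_last_inner (cadena : String) (m : Nat) (h : cadena.toList.length = m + 1) :
    PySem.Dict.empty.insert (String.ofList [PySem.List.pyGetD cadena.toList (-1) ' ']) ""
      = pvInner cadena.toList m m := by
  rw [pv_sym_last cadena m h (pv_ne_nil h)]
  unfold pvInner
  rw [show pvNext m m = "" from by simp [pvNext]]

lemma pv_items (cadena : String) (m : Nat) (h : cadena.toList.length = m + 1) :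
    (pvDictA cadena).items
      = (List.range (m + 1)).map (fun i => (pvKey i, pvInner cadena.toList m i)) := by
  unfold pvDictA
  simp only [PySem.Str.len]
  rw [show ((cadena.toList.length : Int) - 1) = ((m : Nat) : Int) by omega]
  rw [PySem.List.pyRange_zero_natCast, List.foldl_map]
  have hbody : List.foldl
      (fun (d : PySem.Dict String (PySem.Dict String String)) (a : Nat) =>
        d.insert ("q" ++ PySem.Int.toStr (a : Int))
          (PySem.Dict.empty.insert (String.ofList [PySem.List.pyGetD cadena.toList (a : Int) ' '])
            ("q" ++ PySem.Int.toStr ((a : Int) + 1)))) PySem.Dict.empty (List.range m)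
      = List.foldl (fun d a => d.insert (pvKey a) (pvInner cadena.toList m a))
          PySem.Dict.empty (List.range m) := by
    apply PySem.List.foldl_congr_mem
    intro d a ha
    have ham : a < m := List.mem_range.mp ha
    simp only [pvKey, pvInner, pvSym, pvNext, if_neg (by omega : ¬ a = m),
      PySem.List.pyGetD_natCast]
    norm_cast
  rw [hbody]
  have hfresh : (List.foldl (fun d a => d.insert (pvKey a) (pvInner cadena.toList m a))
      PySem.Dict.empty (List.range m)).items
      = (List.range m).map (fun a => (pvKey a, pvInner cadena.toList m a)) := by
    simpa using PySem.Dict.items_foldl_insert_fresh (List.range m) pvKey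
      (fun a => pvInner cadena.toList m a) PySem.Dict.empty
      (by intro a _; simp)
      ((List.nodup_range).map pvKey_inj)
  have hnotc : (List.foldl (fun d a => d.insert (pvKey a) (pvInner cadena.toList m a))
      PySem.Dict.empty (List.range m)).contains (pvKey m) = false := by
    rw [PySem.Dict.contains_eq_decide_mem_keys]
    simp only [decide_eq_false_iff_not, PySem.Dict.keys, hfresh, List.map_map]
    intro hmem
    obtain ⟨a, ha, hk⟩ := List.mem_map.mp hmem
    simp only [Function.comp_apply] at hk
    have := pvKey_inj hk
    have := List.mem_range.mp ha
    omega
  rw [pvKey_def, PySem.Dict.items_insert_of_not_contains _ _ hnotc, hfresh,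
    pv_last_inner cadena m h]
  simp [List.range_succ]

lemma pv_keys_nodup (cadena : String) (m : Nat) (h : cadena.toList.length = m + 1) :
    (pvDictA cadena).keys.Nodup := by
  simp only [PySem.Dict.keys, pv_items cadena m h, List.map_map]
  have he : ((fun p : String × PySem.Dict String String => p.1) ∘
      (fun i => (pvKey i, pvInner cadena.toList m i))) = pvKey := rfl
  rw [he]
  exact (List.nodup_range).map pvKey_inj

lemma pv_getD (cadena : String) (m : Nat) (h : cadena.toList.length = m + 1)
    (i : Nat) (hi : i ≤ m) :
    (pvDictA cadena).getD (pvKey i) PySem.Dict.empty = pvInner cadena.toList m i := by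
  apply PySem.Dict.getD_of_mem_items
  · rw [pv_items cadena m h]
    exact List.mem_map.mpr ⟨i, List.mem_range.mpr (by omega), rfl⟩
  · exact pv_keys_nodup cadena m h

lemma pv_loop (cadena : String) (m : Nat) (h : cadena.toList.length = m + 1) :
    ∀ (k j : Nat) (acc : List String), j + k = m + 1 → j ≤ m →
    List.foldl
      (fun (st : List String × String) simbolo =>
        (st.1 ++ [st.2 ++ " -> " ++
            ((pvDictA cadena).getD st.2 PySem.Dict.empty).getD (String.ofList [simbolo]) "" ++
            " (" ++ String.ofList [simbolo] ++ ")"],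
         ((pvDictA cadena).getD st.2 PySem.Dict.empty).getD (String.ofList [simbolo]) ""))
      (acc, pvKey j) (cadena.toList.drop j)
    = (acc ++ (List.range' j k).map (pvTr cadena.toList m), "") := by
  intro k
  induction k with
  | zero => intro j acc hk hj; omega
  | succ k ih =>
    intro j acc hk hj
    have hjlt : j < cadena.toList.length := by omega
    rw [← List.getElem_cons_drop hjlt, List.foldl_cons]
    dsimp only
    have hsym : String.ofList [cadena.toList[j]] = pvSym cadena.toList j := by
      simp only [pvSym, pv_getD_elem hjlt]
    have hstep : ((pvDictA cadena).getD (pvKey j) PySem.Dict.empty).getD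
        (String.ofList [cadena.toList[j]]) "" = pvNext m j := by
      rw [pv_getD cadena m h j hj, hsym]
      simp only [pvInner]
      exact PySem.Dict.getD_insert_self _ _ _ _
    rw [hstep]
    have htr : pvKey j ++ " -> " ++ pvNext m j ++ " (" ++ String.ofList [cadena.toList[j]] ++ ")"
        = pvTr cadena.toList m j := by rw [hsym]; rfl
    rw [htr]
    rcases Nat.eq_or_lt_of_le hj with hjm | hjm
    · -- j = m : last symbol; the loop ends after this step
      have hk0 : k = 0 := by omega
      subst hk0
      have hnext : pvNext m j = "" := by simp [pvNext, hjm]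
      rw [show j + 1 = cadena.toList.length by omega, List.drop_length]
      simp [hnext, List.range'_succ]
    · -- j < m : the next state is q(j+1), recurse
      have hnext : pvNext m j = pvKey (j + 1) := by simp only [pvNext, if_neg (by omega : ¬ j = m)]
      rw [hnext, ih (j + 1) (acc ++ [pvTr cadena.toList m j]) (by omega) (by omega)]
      simp [List.range'_succ]

lemma pvStr1 (x y z w : String) :
    x ++ " -> " ++ ("q" ++ y) ++ " (" ++ z ++ w = x ++ " -> q" ++ y ++ " (" ++ z ++ w := by
  rw [show (" -> q" : String) = " -> " ++ "q" from rfl]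
  simp only [String.append_assoc]

lemma pvStr2 (x z w : String) :
    x ++ " -> " ++ "" ++ " (" ++ z ++ w = x ++ " ->  (" ++ z ++ w := by
  rw [String.append_empty, show (" ->  (" : String) = " -> " ++ " (" from rfl]
  simp only [String.append_assoc]

lemma pv_trans_eq (cadena : String) (m : Nat) (h : cadena.toList.length = m + 1) :
    (List.range' 0 (m + 1)).map (pvTr cadena.toList m)
      = (List.range m).map (fun a : Nat =>
          "q" ++ PySem.Int.toStr (a : Int) ++ " -> q" ++ PySem.Int.toStr ((a : Int) + 1) ++ " (" ++
            String.ofList [PySem.List.pyGetD cadena.toList (a : Int) ' '] ++ ")")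
        ++ ["q" ++ PySem.Int.toStr ((m : Nat) : Int) ++ " ->  (" ++
            String.ofList [PySem.List.pyGetD cadena.toList (-1) ' '] ++ ")"] := by
  rw [← List.range_eq_range', List.range_succ, List.map_append, List.map_singleton]
  congr 1
  · apply List.map_congr_left
    intro a ha
    have ham : a < m := List.mem_range.mp ha
    simp only [pvTr, pvNext, if_neg (by omega : ¬ a = m), pvKey,
      PySem.List.pyGetD_natCast, pvSym]
    rw [show ((a : Int) + 1) = (((a + 1 : Nat)) : Int) from (Nat.cast_add_one a).symm]
    exact pvStr1 _ _ _ _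
  · rw [pv_sym_last cadena m h (pv_ne_nil h)]
    simp only [pvTr, pvKey]
    rw [show pvNext m m = "" from by simp [pvNext]]
    exact congrArg (fun s => [s]) (pvStr2 _ _ _)

-- ===== VERDICT (by name: the statement is the Claim_ definition above) =====
theorem automata_a_expresion_regular_spec : Claim_equal_automata_a_expresion_regular := by
  intro cadena _hdom hpre
  unfold Spec_automata_a_expresion_regular
  have hne : cadena.toList ≠ [] := fun e => hpre (String.toList_eq_nil_iff.mp e)
  have hpos : 0 < cadena.toList.length := List.length_pos_of_ne_nil hne
  obtain ⟨m, hm⟩ : ∃ m, cadena.toList.length = m + 1 := ⟨cadena.toList.length - 1, by omega⟩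
  simp only [automata_a_expresion_regular, automata_a_expresion_regular_alt]
  have hsplit : List.foldl
      (fun (st : PySem.Dict String (PySem.Dict String String) × List String) (i : Int) =>
        (st.1.insert ("q" ++ PySem.Int.toStr i)
            (PySem.Dict.empty.insert (String.ofList [PySem.List.pyGetD cadena.toList i ' '])
              ("q" ++ PySem.Int.toStr (i + 1))),
         st.2 ++ ["q" ++ PySem.Int.toStr i ++ " -> q" ++ PySem.Int.toStr (i + 1) ++ " (" ++
           String.ofList [PySem.List.pyGetD cadena.toList i ' '] ++ ")"]))
      (PySem.Dict.empty, []) (PySem.List.pyRange 0 (PySem.Str.len cadena - 1))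
      = (List.foldl
          (fun (d : PySem.Dict String (PySem.Dict String String)) (i : Int) =>
            d.insert ("q" ++ PySem.Int.toStr i)
              (PySem.Dict.empty.insert (String.ofList [PySem.List.pyGetD cadena.toList i ' '])
                ("q" ++ PySem.Int.toStr (i + 1))))
          PySem.Dict.empty (PySem.List.pyRange 0 (PySem.Str.len cadena - 1)),
         List.foldl
          (fun (t : List String) (i : Int) =>
            t ++ ["q" ++ PySem.Int.toStr i ++ " -> q" ++ PySem.Int.toStr (i + 1) ++ " (" ++
              String.ofList [PySem.List.pyGetD cadena.toList i ' '] ++ ")"])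
          [] (PySem.List.pyRange 0 (PySem.Str.len cadena - 1))) :=
    PySem.List.foldl_prod_mk
      (fun (d : PySem.Dict String (PySem.Dict String String)) (i : Int) =>
        d.insert ("q" ++ PySem.Int.toStr i)
          (PySem.Dict.empty.insert (String.ofList [PySem.List.pyGetD cadena.toList i ' '])
            ("q" ++ PySem.Int.toStr (i + 1))))
      (fun (t : List String) (i : Int) =>
        t ++ ["q" ++ PySem.Int.toStr i ++ " -> q" ++ PySem.Int.toStr (i + 1) ++ " (" ++
          String.ofList [PySem.List.pyGetD cadena.toList i ' '] ++ ")"])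
      (PySem.List.pyRange 0 (PySem.Str.len cadena - 1)) PySem.Dict.empty []
  rw [hsplit]
  simp only [Prod.mk.injEq]
  refine ⟨?_, ?_⟩
  · -- the joined transition strings agree
    have hA := pv_loop cadena m hm (m + 1) 0 [] (by omega) (by omega)
    rw [List.drop_zero] at hA
    rw [show ("q0" : String) = pvKey 0 from by decide, hA]
    congr 1
    rw [show (PySem.Str.len cadena - 1) = ((m : Nat) : Int) by
        simp only [PySem.Str.len]; omega]
    rw [PySem.List.pyRange_zero_natCast, List.foldl_map,
      PySem.List.foldl_append_singleton_eq_map]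
    simpa using pv_trans_eq cadena m hm
  · -- the automaton dicts agree (A and B perform the same insert sequence)
    rfl
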